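-- pv_equiv track=rewrite | github.com/FegDotExe/RiPytizioni | Alberto/primaDiEPoi.py | primaDiEPoi
-- ===== SOURCE A (Python) =====
-- def primaDiEPoi(s, c):
--     pezzo1="" #Si creano due diverse stringhe, una che contenga i caratteri minori,
--     pezzo2="" #l'altra che contenga quelli maggiori o uguali
--     for lettera in s:
--         if lettera<c:
--             pezzo1+=lettera
--         else:
--             pezzo2+=lettera
--     return pezzo1+pezzo2 #Si restituisce una composizione dei due pezzi
-- ===== SOURCE B (Python) =====
-- def primaDiEPoi(s, c):
--     # stable sort by the boolean key ch >= c: chars with ch < c (key False)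
--     # keep their order and precede the ch >= c group (key True)
--     return "".join(sorted(s, key=lambda ch: ch >= c))
-- ===== Notes on version B (the rewrite author's own statement) =====
-- stated objective: idiomatic
-- what changed: Replaced the manual two-accumulator partition loop with a single stable sort keyed on the boolean comparison ch >= c; stability makes sorted reproduce the stable partition exactly.
import Mathlib
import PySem

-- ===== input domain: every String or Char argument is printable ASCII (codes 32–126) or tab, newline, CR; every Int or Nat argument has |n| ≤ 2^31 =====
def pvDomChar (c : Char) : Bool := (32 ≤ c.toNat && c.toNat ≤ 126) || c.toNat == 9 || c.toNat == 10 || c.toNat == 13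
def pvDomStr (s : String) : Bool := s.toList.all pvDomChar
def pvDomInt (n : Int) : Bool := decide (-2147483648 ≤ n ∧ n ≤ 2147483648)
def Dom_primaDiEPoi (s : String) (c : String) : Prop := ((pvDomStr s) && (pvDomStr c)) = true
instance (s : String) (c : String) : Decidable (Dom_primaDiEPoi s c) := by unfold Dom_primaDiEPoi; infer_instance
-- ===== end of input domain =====

-- B replaces A's two-accumulator partition loop with one stable sort keyed on the boolean ch >= c (idiomatic one-liner); same return value.

-- ===== PORT A =====
-- A: loop over the characters, appending each to pezzo1 (ch < c) or pezzo2 (otherwise), return pezzo1 + pezzo2.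
-- Python's '<' on str is Lean's '<' on List Char (PySem.Str doc); a character of s is the 1-char string [ch].
def primaDiEPoi (s : String) (c : String) : String :=
  let p := s.toList.foldl
    (fun (p : List Char × List Char) lettera =>
      if [lettera] < c.toList then (p.1 ++ [lettera], p.2) else (p.1, p.2 ++ [lettera]))
    ([], [])
  String.ofList (p.1 ++ p.2)

-- ===== PORT B =====
-- B: "".join(sorted(s, key=lambda ch: ch >= c)); ch >= c is ¬(ch < c) on strings.
def primaDiEPoi_alt (s : String) (c : String) : String :=
  String.ofList (PySem.List.sorted s.toList (fun ch => !decide ([ch] < c.toList)) false)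

-- ===== PRECONDITION & SPEC =====
def Spec_primaDiEPoi (s : String) (c : String) (out : String) : Prop := out = primaDiEPoi_alt s c
instance (s : String) (c : String) (out : String) : Decidable (Spec_primaDiEPoi s c out) := by unfold Spec_primaDiEPoi; infer_instance

-- ===== CLAIM (what is proved, stated in full; the proofs are below) =====
def Claim_equal_primaDiEPoi : Prop := ∀ (s : String) (c : String), Dom_primaDiEPoi s c → Spec_primaDiEPoi s c (primaDiEPoi s c)

-- ===== LEMMAS AND PROOFS =====

-- A's loop is the stable partition: each accumulator collects the matching filter.
theorem partition_foldl {α : Type} (p : α → Prop) [DecidablePred p] (xs : List α) (a b : List α) :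
    xs.foldl (fun (q : List α × List α) x =>
      if p x then (q.1 ++ [x], q.2) else (q.1, q.2 ++ [x])) (a, b)
    = (a ++ xs.filter (fun x => decide (p x)),
       b ++ xs.filter (fun x => !decide (p x))) := by
  induction xs generalizing a b with
  | nil => simp
  | cons x t ih =>
    by_cases h : p x <;> simp [List.foldl_cons, h, ih]

-- inserting x when 'before x' is false on all of l and true on the head of r lands x between them
theorem insertBy_split {α : Type} (before : α → α → Bool) (x : α) (l r : List α)
    (hl : ∀ y ∈ l, before x y = false) (hr : ∀ y ∈ r, before x y = true) :
    PySem.List.insertBy before x (l ++ r) = l ++ x :: r := by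
  induction l with
  | nil =>
    cases r with
    | nil => simp [PySem.List.insertBy]
    | cons y t => simp [PySem.List.insertBy, hr y (by simp)]
  | cons y t ih =>
    have hy : before x y = false := hl y (by simp)
    simp only [List.cons_append, PySem.List.insertBy, hy]
    simp [ih (fun z hz => hl z (by simp [hz]))]

-- insertion sort with a Bool key keeps falses (in order) before trues (in order)
theorem foldl_insertBy_bool {α : Type} (key : α → Bool) (xs : List α) (l r : List α)
    (hl : ∀ y ∈ l, key y = false) (hr : ∀ y ∈ r, key y = true) :
    xs.foldl (fun acc x =>
        PySem.List.insertBy (fun a b => decide (key a < key b)) x acc) (l ++ r)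
    = (l ++ xs.filter (fun x => !key x)) ++ (r ++ xs.filter key) := by
  induction xs generalizing l r with
  | nil => simp
  | cons x t ih =>
    by_cases hx : key x = true
    · have h1 : PySem.List.insertBy (fun a b => decide (key a < key b)) x (l ++ r)
          = l ++ (r ++ [x]) := by
        have := insertBy_split (fun a b => decide (key a < key b)) x (l ++ r) []
          (fun y hy => by
            rcases (List.mem_append.mp hy) with h | h
            · simp [hx, hl y h]
            · simp [hx, hr y h])
          (by simp)
        simpa using this
      rw [List.foldl_cons, h1]
      rw [ih (l := l) (r := r ++ [x]) hl
        (fun y hy => by rcases (List.mem_append.mp hy) with h | h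
                        · exact hr y h
                        · simp at h; simp [h, hx])]
      simp [hx]
    · have hx' : key x = false := by simpa using hx
      have h1 : PySem.List.insertBy (fun a b => decide (key a < key b)) x (l ++ r)
          = (l ++ [x]) ++ r := by
        have := insertBy_split (fun a b => decide (key a < key b)) x l r
          (fun y hy => by simp [hx', hl y hy])
          (fun y hy => by simp [hx', hr y hy])
        simpa using this
      rw [List.foldl_cons, h1]
      rw [ih (l := l ++ [x]) (r := r)
        (fun y hy => by rcases (List.mem_append.mp hy) with h | h
                        · exact hl y h
                        · simp at h; simp [h, hx'])
        hr]
      simp [hx']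

theorem sorted_bool_key {α : Type} (key : α → Bool) (xs : List α) :
    PySem.List.sorted xs key false
    = xs.filter (fun x => !key x) ++ xs.filter key := by
  have := foldl_insertBy_bool key xs [] []
    (by simp) (by simp)
  simpa [PySem.List.sorted] using this

-- ===== VERDICT (by name: the statement is the Claim_ definition above) =====
theorem primaDiEPoi_spec : Claim_equal_primaDiEPoi := by
  intro s c _
  unfold Spec_primaDiEPoi primaDiEPoi primaDiEPoi_alt
  rw [sorted_bool_key]
  simp only [partition_foldl (fun ch => [ch] < c.toList)]
  simp
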